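-- pv_equiv track=rewrite | github.com/pluniox/Stock | stock.py | sortie_en_colis_paquet
-- ===== SOURCE A (Python) =====
-- def sortie_de_produit(liste, paquet):
--   """Compare deux listes (Dans ce context ici ce sera le stock de l'entrepôt et
--   un paquet de produits), enlève les premiers éléments correspondants et les renvoie."""
--   curseur = 0
--   sortie = []
--   while curseur < len(liste) and len(paquet) > 0:
--     if liste[curseur] in paquet:
--       paquet.remove(liste[curseur])
--       sortie.append(liste.pop(curseur))
--     else:
--       curseur += 1
--   return sortie
--
-- def sortie_en_colis_paquet(stock, paquet):
--   """Effectue la sortie d'un paquet de produits du stock (en utilisant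
--   sortie_de_produit), puis empile cette sortie dans un colis, du plus grand volume au
--   plus petit."""
--   sortie = sortie_de_produit(stock, paquet)
--   colis = []
--
--   if sortie:
--     while sortie:
--       max_value = sortie[0]
--       for produit in sortie:
--         if produit[-1] > max_value[-1]:
--           max_value = produit
--       colis = [max_value] + colis
--       sortie.remove(max_value)
--   return colis
-- ===== SOURCE B (Python) =====
-- def sortie_en_colis_paquet(stock, paquet):
--   # One counting pass over stock replaces the cursor/remove loop of
--   # sortie_de_produit (return value only: this B does not mutate stock/paquet),
--   # and one builtin stable key-sort of the reversed extraction replaces the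
--   # hand-rolled selection sort.
--   cnt = {}
--   for p in paquet:
--     k = tuple(p)
--     cnt[k] = cnt.get(k, 0) + 1
--   sortie = []
--   for p in stock:
--     k = tuple(p)
--     if cnt.get(k, 0) > 0:
--       cnt[k] = cnt[k] - 1
--       sortie.append(p)
--   sortie.reverse()
--   return sorted(sortie, key=lambda produit: produit[-1])
-- ===== Notes on version B (the rewrite author's own statement) =====
-- stated objective: alternative
-- what changed: The cursor/remove extraction loop (repeated 'in'/remove/pop scans over paquet and stock) is replaced by a dict counter of paquet consumed in one pass over stock, and the hand-rolled selection sort (scan for max, prepend, remove) by reversing the extraction and one builtin stable key-sort; B does not mutate stock/paquet (return-value equivalence), and Pre_ excludes exactly the inputs (empty product present in both stock and paquet) on which both A and B raise IndexError at produit[-1].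
import Mathlib
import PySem

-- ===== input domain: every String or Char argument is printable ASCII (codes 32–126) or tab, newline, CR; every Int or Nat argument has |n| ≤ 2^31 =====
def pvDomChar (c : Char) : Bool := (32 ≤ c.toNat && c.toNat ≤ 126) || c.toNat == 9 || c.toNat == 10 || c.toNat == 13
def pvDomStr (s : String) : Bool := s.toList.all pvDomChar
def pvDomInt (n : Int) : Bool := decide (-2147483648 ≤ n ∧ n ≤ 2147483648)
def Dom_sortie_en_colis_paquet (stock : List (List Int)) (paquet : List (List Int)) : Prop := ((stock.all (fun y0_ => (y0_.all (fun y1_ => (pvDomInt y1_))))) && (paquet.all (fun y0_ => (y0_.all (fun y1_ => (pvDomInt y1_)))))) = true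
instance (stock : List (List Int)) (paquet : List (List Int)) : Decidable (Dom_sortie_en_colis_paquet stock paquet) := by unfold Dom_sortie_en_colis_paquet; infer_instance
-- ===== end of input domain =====

-- B replaces A's cursor/remove extraction loop by one counting pass over stock (a dict
-- counter of paquet) and A's hand-rolled selection sort by one stable key-sort of the
-- reversed extraction; equivalence is about the RETURN value — Python A mutates
-- stock/paquet in place, B does not.


-- ===== PORT A =====
-- helper of A: sortie_de_produit (the while-loop with curseur over liste).
-- Only its RETURN value 'sortie' is used by sortie_en_colis_paquet.
def sortieDeProduitAux (liste paquet sortie : List (List Int)) (curseur : Nat) :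
    List (List Int) :=
  if h : curseur < liste.length ∧ 0 < paquet.length then
    let x := liste[curseur]'h.1
    if x ∈ paquet then
      -- paquet.remove(x) = erase first equal; liste.pop(curseur) returns x
      sortieDeProduitAux (liste.eraseIdx curseur) (paquet.erase x) (sortie ++ [x]) curseur
    else
      sortieDeProduitAux liste paquet sortie (curseur + 1)
  else sortie
termination_by liste.length - curseur
decreasing_by
  · rw [List.length_eraseIdx_of_lt h.1]; omega
  · omega

def sortie_de_produit (liste paquet : List (List Int)) : List (List Int) :=
  sortieDeProduitAux liste paquet [] 0

-- produit[-1]; Python raises IndexError on an empty produit (excluded by Pre_), defaulted to 0 here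
def pvVol (p : List Int) : Int := (PySem.List.pyGet? p (-1)).getD 0

-- the 'for produit in sortie' max scan of A (max_value = sortie[0] is the seed)
def pvSelect (mv : List Int) (l : List (List Int)) : List Int :=
  l.foldl (fun m p => if pvVol p > pvVol m then p else m) mv

theorem pvSelect_cons (a p : List Int) (t : List (List Int)) :
    pvSelect a (p :: t) = pvSelect (if pvVol p > pvVol a then p else a) t := rfl

-- needed by pvALoop's termination: the selected max is the seed or a member
theorem pvSelect_mem (l : List (List Int)) (a : List Int) :
    pvSelect a l = a ∨ pvSelect a l ∈ l := by
  induction l generalizing a with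
  | nil => exact Or.inl rfl
  | cons p t ih =>
    rw [pvSelect_cons]
    rcases ih (if pvVol p > pvVol a then p else a) with h | h
    · rw [h]; split_ifs with hc
      · exact Or.inr List.mem_cons_self
      · exact Or.inl rfl
    · exact Or.inr (List.mem_cons_of_mem _ h)

-- A's packing while-loop: pick the (first) max by volume, prepend it to colis, remove it
def pvALoop (sortie colis : List (List Int)) : List (List Int) :=
  match sortie with
  | [] => colis
  | m :: t =>
    let mx := pvSelect m (m :: t)
    pvALoop ((m :: t).erase mx) (mx :: colis)
termination_by sortie.length
decreasing_by
  have hm : pvSelect m (m :: t) ∈ m :: t := by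
    rcases pvSelect_mem (m :: t) m with h | h
    · rw [h]; exact List.mem_cons_self
    · exact h
  simp [List.length_erase_of_mem hm]

def sortie_en_colis_paquet (stock : List (List Int)) (paquet : List (List Int)) : List (List Int) :=
  let sortie := sortie_de_produit stock paquet
  let colis : List (List Int) := []
  if sortie.isEmpty then colis else pvALoop sortie colis

-- ===== PORT B =====
-- Source B: build a dict counter of paquet, one pass over stock consuming counts, then
-- reverse and one builtin stable key-sort. (tuple(p) in Python is only for hashability;
-- the Lean Dict keys the List Int directly.)
def sortie_en_colis_paquet_alt (stock : List (List Int)) (paquet : List (List Int)) : List (List Int) :=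
  let cnt := paquet.foldl (fun d p => d.insert p (d.getD p 0 + 1))
    (PySem.Dict.empty : PySem.Dict (List Int) Int)
  let st := stock.foldl
    (fun (st : PySem.Dict (List Int) Int × List (List Int)) p =>
      if st.1.getD p 0 > 0 then (st.1.insert p (st.1.getD p 0 - 1), st.2 ++ [p]) else st)
    (cnt, [])
  PySem.List.sorted st.2.reverse (fun produit => (PySem.List.pyGet? produit (-1)).getD 0)

-- ===== PRECONDITION & SPEC =====
-- Pre_ excludes exactly the inputs on which Python A raises (IndexError from produit[-1]
-- on an empty extracted product): the empty list present in both stock and paquet.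
-- Python B raises IndexError on exactly the same inputs (its sort key is produit[-1]).
def Pre_sortie_en_colis_paquet (stock : List (List Int)) (paquet : List (List Int)) : Prop :=
  ¬ (([] : List Int) ∈ stock ∧ ([] : List Int) ∈ paquet)
instance (stock : List (List Int)) (paquet : List (List Int)) : Decidable (Pre_sortie_en_colis_paquet stock paquet) := by unfold Pre_sortie_en_colis_paquet; infer_instance

def pvWitness_sortie_en_colis_paquet : List (List Int) × List (List Int) :=
  ([[1, 5], [2, 3], [4, 3]], [[4, 3], [1, 5]])

def Spec_sortie_en_colis_paquet (stock : List (List Int)) (paquet : List (List Int)) (out : List (List Int)) : Prop := out = sortie_en_colis_paquet_alt stock paquet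
instance (stock : List (List Int)) (paquet : List (List Int)) (out : List (List Int)) : Decidable (Spec_sortie_en_colis_paquet stock paquet out) := by unfold Spec_sortie_en_colis_paquet; infer_instance

-- ===== CLAIM (what is proved, stated in full; the proofs are below) =====
def Claim_equal_sortie_en_colis_paquet : Prop := ∀ (stock : List (List Int)) (paquet : List (List Int)), Dom_sortie_en_colis_paquet stock paquet → Pre_sortie_en_colis_paquet stock paquet → Spec_sortie_en_colis_paquet stock paquet (sortie_en_colis_paquet stock paquet)

-- ===== LEMMAS AND PROOFS =====

-- the common functional core of both extraction phases: greedy first-match removal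
def pvGreedy : List (List Int)  → List (List Int) → List (List Int)
  | [], _ => []
  | x :: t, p => if x ∈ p then x :: pvGreedy t (p.erase x) else pvGreedy t p

theorem pvGreedy_nil (l : List (List Int)) : pvGreedy l [] = [] := by
  induction l with
  | nil => rfl
  | cons x t ih => simp [pvGreedy, ih]

theorem pvEraseIdx_mid (pre : List (List Int)) (x : List Int) (t : List (List Int)) :
    (pre ++ x :: t).eraseIdx pre.length = pre ++ t := by
  induction pre with
  | nil => rfl
  | cons a pre ih => simpa using ih

-- A's cursor loop computes pvGreedy of the unvisited suffix
theorem aux_eq_greedy (rest : List (List Int)) :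
    ∀ pre paquet sortie : List (List Int), (∀ y ∈ pre, y ∉ paquet) →
      sortieDeProduitAux (pre ++ rest) paquet sortie pre.length
        = sortie ++ pvGreedy rest paquet := by
  induction rest with
  | nil =>
    intro pre paquet sortie _
    rw [sortieDeProduitAux]
    simp [pvGreedy]
  | cons x t ih =>
    intro pre paquet sortie hpre
    by_cases hp : paquet = []
    · subst hp
      rw [sortieDeProduitAux]
      simp [pvGreedy_nil]
    · have hlen : pre.length < (pre ++ x :: t).length := by simp
      have hpos : 0 < paquet.length := List.length_pos_iff.2 hp
      rw [sortieDeProduitAux, dif_pos ⟨hlen, hpos⟩]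
      have hget : (pre ++ x :: t)[pre.length]'hlen = x := by
        rw [List.getElem_append_right (le_refl pre.length)]
        simp
      simp only [hget]
      by_cases hx : x ∈ paquet
      · rw [if_pos hx]
        have herase : (pre ++ x :: t).eraseIdx pre.length = pre ++ t :=
          pvEraseIdx_mid pre x t
        rw [herase,
          ih pre (paquet.erase x) (sortie ++ [x])
            (fun y hy hmem => hpre y hy (List.mem_of_mem_erase hmem))]
        simp [pvGreedy, hx]
      · rw [if_neg hx]
        have hre : pre ++ x :: t = (pre ++ [x]) ++ t := by simp
        have hlen2 : pre.length + 1 = (pre ++ [x]).length := by simp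
        rw [hre, hlen2,
          ih (pre ++ [x]) paquet sortie
            (by intro y hy
                rcases List.mem_append.1 hy with hy' | hy'
                · exact hpre y hy'
                · simp at hy'; subst hy'; exact hx)]
        simp [pvGreedy, hx]

theorem sortie_de_produit_eq_greedy (liste paquet : List (List Int)) :
    sortie_de_produit liste paquet = pvGreedy liste paquet := by
  have := aux_eq_greedy liste [] paquet [] (by simp)
  simpa [sortie_de_produit] using this

-- B's counting pass computes pvGreedy too: the dict state tracks remaining counts
theorem pick_eq_greedy (stock : List (List Int)) :
    ∀ (d : PySem.Dict (List Int) Int) (p acc : List (List Int)),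
      (∀ x, d.getD x 0 = (p.count x : Int)) →
      (stock.foldl
        (fun (st : PySem.Dict (List Int) Int × List (List Int)) q =>
          if st.1.getD q 0 > 0 then (st.1.insert q (st.1.getD q 0 - 1), st.2 ++ [q]) else st)
        (d, acc)).2 = acc ++ pvGreedy stock p := by
  induction stock with
  | nil => intro d p acc _; simp [pvGreedy]
  | cons x t ih =>
    intro d p acc hd
    simp only [List.foldl_cons]
    by_cases hx : x ∈ p
    · have hcnt : 0 < p.count x := List.count_pos_iff.2 hx
      have hpos : d.getD x 0 > 0 := by rw [hd x]; exact_mod_cast hcnt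
      rw [if_pos hpos]
      have hd' : ∀ y, (d.insert x (d.getD x 0 - 1)).getD y 0 = ((p.erase x).count y : Int) := by
        intro y
        rw [PySem.Dict.getD_insert]
        by_cases hyx : y = x
        · subst hyx
          rw [if_pos rfl, hd y, List.count_erase_self]
          have : 1 ≤ p.count y := hcnt
          push_cast [this]
          ring
        · rw [if_neg hyx, hd y, List.count_erase_of_ne hyx]
      rw [ih _ (p.erase x) (acc ++ [x]) hd']
      simp [pvGreedy, hx]
    · have hz : d.getD x 0 = 0 := by
        rw [hd x, List.count_eq_zero_of_not_mem hx]; rfl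
      rw [if_neg (by rw [hz]; exact lt_irrefl 0)]
      rw [ih d p acc hd]
      simp [pvGreedy, hx]

-- abbreviation for the sort's insertion step (PySem.List.sorted IS this foldl, by rfl)
def pvIns (acc : List (List Int)) (x : List Int) : List (List Int) :=
  PySem.List.insertBy (fun a b => decide (pvVol a < pvVol b)) x acc

theorem insertBy_append_last {α : Type} (before : α → α → Bool) (x m : α) (ys : List α)
    (h : before x m = true) :
    PySem.List.insertBy before x (ys ++ [m]) = PySem.List.insertBy before x ys ++ [m] := by
  induction ys with
  | nil => simp [PySem.List.insertBy, h]
  | cons y t ih =>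
    simp only [List.cons_append, PySem.List.insertBy]
    split_ifs with hc <;> simp [ih]

theorem foldl_pvIns_append_last (l : List (List Int)) (acc : List (List Int)) (m : List Int)
    (h : ∀ z ∈ l, pvVol z < pvVol m) :
    l.foldl pvIns (acc ++ [m]) = l.foldl pvIns acc ++ [m] := by
  induction l generalizing acc with
  | nil => simp
  | cons z t ih =>
    simp only [List.foldl_cons]
    rw [show pvIns (acc ++ [m]) z = pvIns acc z ++ [m] from
          insertBy_append_last _ z m acc (by simp [h z (by simp)]),
        ih _ (fun z hz => h z (by simp [hz]))]

-- inserting an element ≥ everything already sorted lands at the end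
theorem pvIns_max (s : List (List Int)) (m : List Int)
    (h : ∀ y ∈ s, pvVol y ≤ pvVol m) :
    pvIns (PySem.List.sorted s (fun p => pvVol p)) m
      = PySem.List.sorted s (fun p => pvVol p) ++ [m] := by
  apply PySem.List.insertBy_of_forall_not_before
  intro y hy
  have := h y ((PySem.List.mem_sorted _ _ _ _).1 hy)
  simp; omega

-- pvSelect finds the FIRST maximal-volume element: the seed-or-split characterisation
theorem pvSelect_split (l : List (List Int)) (a : List Int) :
    (pvSelect a l = a ∧ ∀ y ∈ l, pvVol y ≤ pvVol a) ∨
    (∃ l₁ l₂, l = l₁ ++ pvSelect a l :: l₂ ∧ pvVol a < pvVol (pvSelect a l) ∧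
      (∀ y ∈ l₁, pvVol y < pvVol (pvSelect a l)) ∧
      (∀ y ∈ l₂, pvVol y ≤ pvVol (pvSelect a l))) := by
  induction l generalizing a with
  | nil => exact Or.inl ⟨rfl, by simp⟩
  | cons p t ih =>
    by_cases hc : pvVol p > pvVol a
    · rw [pvSelect_cons, if_pos hc]
      rcases ih p with ⟨he, hall⟩ | ⟨l₁, l₂, hsplit, hlt, h1, h2⟩
      · rw [he]
        exact Or.inr ⟨[], t, by simp, hc, by simp, hall⟩
      · refine Or.inr ⟨p :: l₁, l₂, by simp only [List.cons_append]; rw [← hsplit], lt_trans hc hlt, ?_, h2⟩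
        intro y hy
        rcases List.mem_cons.1 hy with rfl | hy'
        · exact hlt
        · exact h1 y hy'
    · rw [pvSelect_cons, if_neg hc]
      have hc' : pvVol p ≤ pvVol a := not_lt.1 hc
      rcases ih a with ⟨he, hall⟩ | ⟨l₁, l₂, hsplit, hlt, h1, h2⟩
      · rw [he]
        refine Or.inl ⟨rfl, ?_⟩
        intro y hy
        rcases List.mem_cons.1 hy with rfl | hy'
        · exact hc'
        · exact hall y hy'
      · refine Or.inr ⟨p :: l₁, l₂, by simp only [List.cons_append]; rw [← hsplit], hlt, ?_, h2⟩
        intro y hy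
        rcases List.mem_cons.1 hy with rfl | hy'
        · exact lt_of_le_of_lt hc' hlt
        · exact h1 y hy'

-- moving the first maximum out of a (reversed) sort: sorted(rev(s₁ ++ mx :: s₂)) = sorted(rev(s₁ ++ s₂)) ++ [mx]
theorem sorted_rev_split (s₁ s₂ : List (List Int)) (mx : List Int)
    (h1 : ∀ y ∈ s₁, pvVol y < pvVol mx) (h2 : ∀ y ∈ s₂, pvVol y ≤ pvVol mx) :
    PySem.List.sorted (s₁ ++ mx :: s₂).reverse (fun p => pvVol p)
      = PySem.List.sorted (s₁ ++ s₂).reverse (fun p => pvVol p) ++ [mx] := by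
  have hfold : ∀ xs : List (List Int),
      PySem.List.sorted xs (fun p => pvVol p) = xs.foldl pvIns [] := fun xs =>
    PySem.List.sorted_eq_foldl_insertBy xs (fun p => pvVol p)
  rw [hfold, hfold]
  simp only [List.reverse_append, List.reverse_cons]
  rw [List.foldl_append, List.foldl_append, List.foldl_append]
  have hmid : List.foldl pvIns (List.foldl pvIns ([] : List (List Int)) s₂.reverse) [mx]
      = List.foldl pvIns [] s₂.reverse ++ [mx] := by
    simp only [List.foldl_cons, List.foldl_nil]
    have := pvIns_max s₂.reverse mx (fun y hy => h2 y (List.mem_reverse.1 hy))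
    rw [hfold s₂.reverse] at this
    exact this
  rw [hmid]
  exact foldl_pvIns_append_last s₁.reverse _ mx
    (fun z hz => h1 z (List.mem_reverse.1 hz))

-- the main loop invariant: A's packing loop is the key-sort of the reversed list, prepended to colis
theorem pvALoop_eq (n : Nat) :
    ∀ s colis : List (List Int), s.length ≤ n →
      pvALoop s colis = PySem.List.sorted s.reverse (fun p => pvVol p) ++ colis := by
  induction n with
  | zero =>
    intro s colis hs
    have : s = [] := List.length_eq_zero_iff.1 (Nat.le_zero.1 hs)
    subst this
    simp [pvALoop, PySem.List.sorted]
  | succ n ih =>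
    intro s colis hs
    match s with
    | [] => simp [pvALoop, PySem.List.sorted]
    | m :: t =>
      have hseed : pvSelect m (m :: t) = pvSelect m t := by
        rw [pvSelect_cons, if_neg (lt_irrefl (pvVol m))]
      -- decompose m :: t as s₁ ++ mx :: s₂ with s₁ strictly below, s₂ at most mx
      obtain ⟨s₁, s₂, hsplit, hlo, hhi⟩ :
          ∃ s₁ s₂, m :: t = s₁ ++ pvSelect m t :: s₂ ∧
            (∀ y ∈ s₁, pvVol y < pvVol (pvSelect m t)) ∧
            (∀ y ∈ s₂, pvVol y ≤ pvVol (pvSelect m t)) := by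
        rcases pvSelect_split t m with ⟨he, hall⟩ | ⟨l₁, l₂, hsp, hlt, ha, hb⟩
        · exact ⟨[], t, by simp [he], by simp, by rw [he]; exact hall⟩
        · refine ⟨m :: l₁, l₂, by simp only [List.cons_append]; rw [← hsp], ?_, hb⟩
          intro y hy
          rcases List.mem_cons.1 hy with rfl | hy'
          · exact hlt
          · exact ha y hy'
      have hnotmem : pvSelect m t ∉ s₁ := fun hmem => lt_irrefl _ (hlo _ hmem)
      have herase : (m :: t).erase (pvSelect m t) = s₁ ++ s₂ := by
        rw [hsplit, List.erase_append_right _ hnotmem, List.erase_cons_head]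
      have hlen : (s₁ ++ s₂).length ≤ n := by
        have h1 : (m :: t).length = (s₁ ++ s₂).length + 1 := by
          rw [hsplit]; simp; omega
        omega
      calc pvALoop (m :: t) colis
          = pvALoop ((m :: t).erase (pvSelect m t)) (pvSelect m t :: colis) := by
            rw [pvALoop]
            simp only [hseed]
        _ = PySem.List.sorted (s₁ ++ s₂).reverse (fun p => pvVol p) ++ pvSelect m t :: colis := by
            rw [herase, ih _ _ hlen]
        _ = PySem.List.sorted (m :: t).reverse (fun p => pvVol p) ++ colis := by
            rw [hsplit, sorted_rev_split s₁ s₂ _ hlo hhi]; simp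

-- B's extraction list equals A's extraction list
theorem alt_sortie_eq (stock paquet : List (List Int)) :
    (stock.foldl
      (fun (st : PySem.Dict (List Int) Int × List (List Int)) p =>
        if st.1.getD p 0 > 0 then (st.1.insert p (st.1.getD p 0 - 1), st.2 ++ [p]) else st)
      (paquet.foldl (fun d p => d.insert p (d.getD p 0 + 1))
        (PySem.Dict.empty : PySem.Dict (List Int) Int), [])).2
      = sortie_de_produit stock paquet := by
  rw [sortie_de_produit_eq_greedy]
  have hcnt : ∀ x, (paquet.foldl (fun d p => d.insert p (d.getD p 0 + 1))
      (PySem.Dict.empty : PySem.Dict (List Int) Int)).getD x 0 = (paquet.count x : Int) := by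
    intro x
    rw [PySem.Dict.foldl_insert_getD_add_one_eq_counter, PySem.Dict.getD_counter]
  simpa using pick_eq_greedy stock _ paquet [] hcnt

-- ===== VERDICT (by name: the statement is the Claim_ definition above) =====
theorem sortie_en_colis_paquet_spec : Claim_equal_sortie_en_colis_paquet := by
  intro stock paquet _hdom _hpre
  unfold Spec_sortie_en_colis_paquet sortie_en_colis_paquet sortie_en_colis_paquet_alt
  show (if (sortie_de_produit stock paquet).isEmpty then ([] : List (List Int)) else
      pvALoop (sortie_de_produit stock paquet) [])
    = PySem.List.sorted
        (stock.foldl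
          (fun (st : PySem.Dict (List Int) Int × List (List Int)) p =>
            if st.1.getD p 0 > 0 then (st.1.insert p (st.1.getD p 0 - 1), st.2 ++ [p]) else st)
          (paquet.foldl (fun d p => d.insert p (d.getD p 0 + 1))
            (PySem.Dict.empty : PySem.Dict (List Int) Int), [])).2.reverse
        (fun produit => (PySem.List.pyGet? produit (-1)).getD 0)
  rw [alt_sortie_eq stock paquet]
  show (if (sortie_de_produit stock paquet).isEmpty then ([] : List (List Int)) else
      pvALoop (sortie_de_produit stock paquet) [])
    = PySem.List.sorted (sortie_de_produit stock paquet).reverse (fun p => pvVol p)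
  by_cases h : (sortie_de_produit stock paquet).isEmpty
  · rw [if_pos h]
    rw [List.isEmpty_iff] at h
    simp [h, PySem.List.sorted]
  · rw [if_neg h]
    exact (pvALoop_eq (sortie_de_produit stock paquet).length _ [] le_rfl).trans (by simp)
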